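-- pv_equiv track=rewrite | github.com/erosika/hermes-agent | hermes_cli/skin.py | _render_drip_line
-- ===== SOURCE A (Python) =====
-- def _render_drip_line(width: int, tokens: tuple[tuple[int, str, str], ...]) -> str:
--     line: list[str] = []
--     active_color: str | None = None
--     lookup = {index: (color, glyph) for index, color, glyph in tokens}
--     for idx in range(width):
--         token = lookup.get(idx)
--         if token is None:
--             if active_color is not None:
--                 line.append("[/]")
--                 active_color = None
--             line.append(" ")
--             continue
--         color, glyph = token
--         if color != active_color:
--             if active_color is not None:
--                 line.append("[/]")
--             line.append(f"[{color}]")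
--             active_color = color
--         line.append(glyph)
--     if active_color is not None:
--         line.append("[/]")
--     return "".join(line)
-- ===== SOURCE B (Python) =====
-- def _render_drip_line(width: int, tokens: tuple[tuple[int, str, str], ...]) -> str:
--     # last-wins dedup of in-range token indices, then a single sweep over the
--     # sorted occupied columns, emitting each gap as one run of spaces.
--     last: dict[int, tuple[str, str]] = {}
--     for index, color, glyph in tokens:
--         if 0 <= index < width:
--             last[index] = (color, glyph)
--     parts: list[str] = []
--     pos = 0
--     active: str | None = None
--     for index in sorted(last):
--         color, glyph = last[index]
--         if pos < index:
--             if active is not None: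
--                 parts.append("[/]")
--                 active = None
--             parts.append(" " * (index - pos))
--         if color != active:
--             if active is not None:
--                 parts.append("[/]")
--             parts.append(f"[{color}]")
--             active = color
--         parts.append(glyph)
--         pos = index + 1
--     if active is not None:
--         parts.append("[/]")
--     parts.append(" " * (width - pos))
--     return "".join(parts)
-- ===== Notes on version B (the rewrite author's own statement) =====
-- stated objective: faster
-- what changed: Replaces the per-column scan (a dict lookup for every column in range(width)) by a single sweep over the sorted in-range occupied columns, emitting each empty gap as one run of spaces.
import Mathlib
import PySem

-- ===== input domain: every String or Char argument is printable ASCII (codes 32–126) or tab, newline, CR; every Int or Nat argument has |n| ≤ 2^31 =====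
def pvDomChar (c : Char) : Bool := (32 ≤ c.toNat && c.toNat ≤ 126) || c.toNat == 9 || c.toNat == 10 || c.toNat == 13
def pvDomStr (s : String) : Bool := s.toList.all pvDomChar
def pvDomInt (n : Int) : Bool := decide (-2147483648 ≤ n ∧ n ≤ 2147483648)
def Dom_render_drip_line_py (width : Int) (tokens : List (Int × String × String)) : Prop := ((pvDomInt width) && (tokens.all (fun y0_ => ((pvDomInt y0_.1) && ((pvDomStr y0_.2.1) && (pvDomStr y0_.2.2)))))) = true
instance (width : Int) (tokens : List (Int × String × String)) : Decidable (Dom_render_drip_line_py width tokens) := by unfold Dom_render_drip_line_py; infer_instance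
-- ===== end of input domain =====

-- B differs from A by sweeping only the sorted occupied columns (each gap emitted as one
-- run of spaces) instead of scanning every column with a dict lookup; same return value.

-- ===== PORT A =====
-- loop body of "for idx in range(width)" kept as a named helper
def pvStepA (lookup : PySem.Dict Int (String × String)) (st : List String × Option String) (idx : Int) : List String × Option String :=
  match lookup.get? idx with
  | none =>
      -- token is None: close the active color, append " "
      let line := if st.2.isSome then st.1 ++ ["[/]"] else st.1
      (line ++ [" "], none)
  | some cg =>
      -- if color != active_color: close the active color, open the new tag
      let line := if st.2 ≠ some cg.1 then (if st.2.isSome then st.1 ++ ["[/]"] else st.1) ++ ["[" ++ cg.1 ++ "]"] else st.1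
      let active := if st.2 ≠ some cg.1 then some cg.1 else st.2
      (line ++ [cg.2], active)

def render_drip_line_py (width : Int) (tokens : List (Int × String × String)) : String :=
  -- lookup = {index: (color, glyph) for index, color, glyph in tokens}
  let lookup : PySem.Dict Int (String × String) :=
    tokens.foldl (fun d t => d.insert t.1 (t.2.1, t.2.2)) PySem.Dict.empty
  let st := (PySem.List.pyRange 0 width 1).foldl (pvStepA lookup) ([], none)
  let line := if st.2.isSome then st.1 ++ ["[/]"] else st.1
  PySem.Str.join "" line

-- ===== PORT B =====
-- " " * k  (Python string repetition; empty for k ≤ 0 — exact, hand-ported)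
def pvSpaces (k : Int) : String := String.ofList (List.replicate k.toNat ' ')

-- loop body of "for index in sorted(last)" kept as a named helper
def pvStepB (last : PySem.Dict Int (String × String)) (st : List String × Int × Option String) (index : Int) : List String × Int × Option String :=
  let cg := last.getD index ("", "")   -- last[index]; index is a key of last, so the default is never used
  let parts := if st.2.1 < index then (if st.2.2.isSome then st.1 ++ ["[/]"] else st.1) ++ [pvSpaces (index - st.2.1)] else st.1
  let active := if st.2.1 < index then none else st.2.2
  let parts := if active ≠ some cg.1 then (if active.isSome then parts ++ ["[/]"] else parts) ++ ["[" ++ cg.1 ++ "]"] else parts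
  (parts ++ [cg.2], index + 1, some cg.1)

def render_drip_line_py_alt (width : Int) (tokens : List (Int × String × String)) : String :=
  -- last-wins dedup of the in-range token indices
  let last : PySem.Dict Int (String × String) :=
    tokens.foldl (fun d t => if 0 ≤ t.1 ∧ t.1 < width then d.insert t.1 (t.2.1, t.2.2) else d) PySem.Dict.empty
  let st := (PySem.List.sorted last.keys (fun x => x)).foldl (pvStepB last) ([], 0, none)
  let parts := if st.2.2.isSome then st.1 ++ ["[/]"] else st.1
  PySem.Str.join "" (parts ++ [pvSpaces (width - st.2.1)])

-- ===== PRECONDITION & SPEC =====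
def Spec_render_drip_line_py (width : Int) (tokens : List (Int × String × String)) (out : String) : Prop := out = render_drip_line_py_alt width tokens
instance (width : Int) (tokens : List (Int × String × String)) (out : String) : Decidable (Spec_render_drip_line_py width tokens out) := by unfold Spec_render_drip_line_py; infer_instance

-- ===== CLAIM (what is proved, stated in full; the proofs are below) =====
def Claim_equal_render_drip_line_py : Prop := ∀ (width : Int) (tokens : List (Int × String × String)), Dom_render_drip_line_py width tokens → Spec_render_drip_line_py width tokens (render_drip_line_py width tokens)

-- ===== LEMMAS AND PROOFS =====

-- "".join as a List Char value
def pvJoin (l : List String) : List Char := (l.map String.toList).flatten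

theorem pvStrJoin_toList (l : List String) : (PySem.Str.join "" l).toList = pvJoin l := by
  simp [pvJoin]
  induction l with
  | nil => simp [PySem.Chars.join, List.intercalate]
  | cons h t ih =>
    cases t with
    | nil => simp [PySem.Chars.join, List.intercalate]
    | cons h2 t2 =>
      simp [PySem.Chars.join, List.intercalate] at *
      simpa [List.intersperse] using ih

-- the "[/]" closer emitted for an active color
def pvClose (a : Option String) : List Char := match a with | some _ => "[/]".toList | none => []

-- the tag prefix emitted before a glyph of color c under active color a
def pvOpen (a : Option String) (c : String) : List Char :=
  if a = some c then [] else pvClose a ++ "[".toList ++ c.toList ++ "]".toList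

def pvSp (k : Nat) : List Char := List.replicate k ' '

-- semantics of A's loop over the remaining n columns starting at pos
def pvColsR (f : Int → Option (String × String)) : Nat → Int → Option String → List Char
  | 0, _, a => pvClose a
  | n+1, pos, a =>
    match f pos with
    | none => pvClose a ++ " ".toList ++ pvColsR f n (pos+1) none
    | some cg => pvOpen a cg.1 ++ cg.2.toList ++ pvColsR f n (pos+1) (some cg.1)

-- semantics of B's loop over the remaining sorted occupied columns
def pvToksR (ff : Int → String × String) (w : Int) : List Int → Int → Option String → List Char
  | [], pos, a => pvClose a ++ pvSp (w - pos).toNat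
  | i :: rest, pos, a =>
      (if pos < i then pvClose a ++ pvSp (i - pos).toNat else [])
        ++ pvOpen (if pos < i then none else a) (ff i).1 ++ (ff i).2.toList
        ++ pvToksR ff w rest (i+1) (some (ff i).1)

-- the occupied columns of [pos, pos+n), in increasing order
def pvKeysIn (f : Int → Option (String × String)) : Int → Nat → List Int
  | _, 0 => []
  | pos, n+1 =>
    match f pos with
    | none => pvKeysIn f (pos+1) n
    | some _ => pos :: pvKeysIn f (pos+1) n

def pvFinA (st : List String × Option String) : List Char :=
  pvJoin (if st.2.isSome then st.1 ++ ["[/]"] else st.1)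

def pvFinB (w : Int) (st : List String × Int × Option String) : List Char :=
  pvJoin ((if st.2.2.isSome then st.1 ++ ["[/]"] else st.1) ++ [pvSpaces (w - st.2.1)])

theorem pvFinA_eq (st : List String × Option String) :
    (PySem.Str.join "" (if st.2.isSome then st.1 ++ ["[/]"] else st.1)).toList = pvFinA st := by
  rw [pvFinA, pvStrJoin_toList]

theorem pvFinB_eq (w : Int) (st : List String × Int × Option String) :
    (PySem.Str.join "" ((if st.2.2.isSome then st.1 ++ ["[/]"] else st.1) ++ [pvSpaces (w - st.2.1)])).toList = pvFinB w st := by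
  rw [pvFinB, pvStrJoin_toList]

theorem pvKeysIn_mem (f : Int → Option (String × String)) :
    ∀ (n : Nat) (pos x : Int), x ∈ pvKeysIn f pos n ↔ pos ≤ x ∧ x < pos + n ∧ (f x).isSome := by
  intro n
  induction n with
  | zero =>
    intro pos x
    simp only [pvKeysIn, List.not_mem_nil, false_iff, Nat.cast_zero]
    rintro ⟨h1, h2, -⟩
    omega
  | succ n ih =>
    intro pos x
    cases hf : f pos with
    | none =>
      simp only [pvKeysIn, hf, ih]
      constructor
      · rintro ⟨h1, h2, h3⟩
        refine ⟨by omega, by push_cast at *; omega, h3⟩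
      · rintro ⟨h1, h2, h3⟩
        by_cases hx : x = pos
        · subst hx; rw [hf] at h3; simp at h3
        · refine ⟨by omega, by push_cast at *; omega, h3⟩
    | some cg =>
      simp only [pvKeysIn, hf, List.mem_cons, ih]
      constructor
      · rintro (rfl | ⟨h1, h2, h3⟩)
        · exact ⟨le_refl _, by push_cast; omega, by rw [hf]; rfl⟩
        · exact ⟨by omega, by push_cast at *; omega, h3⟩
      · rintro ⟨h1, h2, h3⟩
        by_cases hx : x = pos
        · exact Or.inl hx
        · exact Or.inr ⟨by omega, by push_cast at *; omega, h3⟩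

theorem pvKeysIn_pairwise (f : Int → Option (String × String)) :
    ∀ (n : Nat) (pos : Int), (pvKeysIn f pos n).Pairwise (· < ·) := by
  intro n
  induction n with
  | zero => intro pos; simp [pvKeysIn]
  | succ n ih =>
    intro pos
    cases hf : f pos with
    | none => simp only [pvKeysIn, hf]; exact ih (pos+1)
    | some cg =>
      simp only [pvKeysIn, hf]
      refine List.Pairwise.cons ?_ (ih (pos+1))
      intro x hx
      have := (pvKeysIn_mem f n (pos+1) x).mp hx
      omega

theorem pvA_loop (d : PySem.Dict Int (String × String)) :
    ∀ (n : Nat) (pos : Int) (acc : List String) (a : Option String),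
      pvFinA (((List.range n).map (fun k : Nat => pos + (k : Int))).foldl (pvStepA d) (acc, a))
      = pvJoin acc ++ pvColsR d.get? n pos a := by
  intro n
  induction n with
  | zero =>
    intro pos acc a
    cases a <;> simp [pvFinA, pvColsR, pvClose, pvJoin]
  | succ n ih =>
    intro pos acc a
    have hmap : (List.range (n+1)).map (fun k : Nat => pos + (k : Int))
        = pos :: (List.range n).map (fun k : Nat => (pos+1) + (k : Int)) := by
      rw [List.range_succ_eq_map]
      simp only [List.map_cons, List.map_map, Nat.cast_zero, add_zero]
      refine congrArg _ (List.map_congr_left fun k _ => ?_)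
      show pos + ((k + 1 : Nat) : Int) = (pos + 1) + (k : Int)
      push_cast
      ring
    rw [hmap, List.foldl_cons]
    cases hf : d.get? pos with
    | none =>
      have hstep : pvStepA d (acc, a) pos = ((if a.isSome then acc ++ ["[/]"] else acc) ++ [" "], none) := by
        simp [pvStepA, hf]
      rw [hstep, ih]
      cases a <;> simp [hf, pvClose, pvJoin, pvColsR]
    | some cg =>
      by_cases hc : a = some cg.1
      · have hstep : pvStepA d (acc, a) pos = (acc ++ [cg.2], a) := by
          simp [pvStepA, hf, hc]
        rw [hstep, ih]
        simp [pvColsR, hf, pvOpen, hc, pvJoin]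
      · have hstep : pvStepA d (acc, a) pos
            = ((if a.isSome then acc ++ ["[/]"] else acc) ++ ["[" ++ cg.1 ++ "]"] ++ [cg.2], some cg.1) := by
          simp [pvStepA, hf, hc]
        rw [hstep, ih]
        cases a <;> simp [pvColsR, hf, pvOpen, hc, pvClose, pvJoin]

theorem pvB_loop (d : PySem.Dict Int (String × String)) (w : Int) :
    ∀ (L : List Int) (parts : List String) (pos : Int) (a : Option String),
      pvFinB w (L.foldl (pvStepB d) (parts, pos, a))
      = pvJoin parts ++ pvToksR (fun i => d.getD i ("", "")) w L pos a := by
  intro L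
  induction L with
  | nil =>
    intro parts pos a
    cases a <;> simp [pvFinB, pvToksR, pvClose, pvJoin, pvSpaces, pvSp]
  | cons i rest ih =>
    intro parts pos a
    rw [List.foldl_cons]
    by_cases h1 : pos < i
    · have hstep : pvStepB d (parts, pos, a) i
          = (((if a.isSome then parts ++ ["[/]"] else parts) ++ [pvSpaces (i - pos)])
              ++ ["[" ++ (d.getD i ("", "")).1 ++ "]"] ++ [(d.getD i ("", "")).2], i + 1, some (d.getD i ("", "")).1) := by
        simp [pvStepB, h1]
      rw [hstep, ih]
      cases a <;> simp [pvToksR, h1, pvOpen, pvClose, pvJoin, pvSpaces, pvSp]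
    · by_cases hc : a = some (d.getD i ("", "")).1
      · have hstep : pvStepB d (parts, pos, a) i
            = (parts ++ [(d.getD i ("", "")).2], i + 1, some (d.getD i ("", "")).1) := by
          simp [pvStepB, h1, hc]
        rw [hstep, ih]
        simp [pvToksR, h1, pvOpen, hc, pvJoin]
      · have hstep : pvStepB d (parts, pos, a) i
            = ((if a.isSome then parts ++ ["[/]"] else parts)
                ++ ["[" ++ (d.getD i ("", "")).1 ++ "]"] ++ [(d.getD i ("", "")).2], i + 1, some (d.getD i ("", "")).1) := by
          simp [pvStepB, h1, hc]
        rw [hstep, ih]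
        cases a <;> simp [pvToksR, h1, pvOpen, hc, pvClose, pvJoin]

theorem pvToksR_skip (ff : Int → String × String) (w : Int) (L : List Int) (pos : Int) (a : Option String)
    (hL : ∀ i ∈ L, pos < i) (hw : pos < w) :
    pvToksR ff w L pos a = pvClose a ++ " ".toList ++ pvToksR ff w L (pos+1) none := by
  have hsp : " ".toList = [' '] := rfl
  cases L with
  | nil =>
    have h1 : (w - pos).toNat = (w - (pos+1)).toNat + 1 := by omega
    simp [pvToksR, pvSp, h1, List.replicate_succ, pvClose, hsp]
  | cons i rest =>
    have hi : pos < i := hL i List.mem_cons_self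
    by_cases h2 : pos + 1 < i
    · have h1 : (i - pos).toNat = (i - (pos+1)).toNat + 1 := by omega
      simp [pvToksR, hi, h2, h1, List.replicate_succ, pvSp, hsp, pvClose]
    · have h3 : i = pos + 1 := by omega
      subst h3
      have h1 : (pos + 1 - pos).toNat = 1 := by omega
      simp [pvToksR, hi, pvSp, hsp, pvClose]

theorem pvCore (f : Int → Option (String × String)) :
    ∀ (n : Nat) (pos : Int) (a : Option String),
      pvColsR f n pos a
        = pvToksR (fun i => (f i).getD ("", "")) (pos + n) (pvKeysIn f pos n) pos a := by
  intro n
  induction n with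
  | zero =>
    intro pos a
    simp [pvColsR, pvKeysIn, pvToksR, pvSp]
  | succ n ih =>
    intro pos a
    have hcast : pos + ((n+1 : Nat) : Int) = (pos + 1) + (n : Int) := by push_cast; ring
    cases hf : f pos with
    | none =>
      have hkeys : pvKeysIn f pos (n+1) = pvKeysIn f (pos+1) n := by simp [pvKeysIn, hf]
      rw [hkeys]
      rw [pvToksR_skip (fun i => (f i).getD ("", "")) (pos + ((n+1 : Nat) : Int)) (pvKeysIn f (pos+1) n) pos a
        (fun i hi => by have := (pvKeysIn_mem f n (pos+1) i).mp hi; omega)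
        (by push_cast; omega)]
      simp only [pvColsR, hf]
      rw [hcast, ← ih]
    | some cg =>
      have hkeys : pvKeysIn f pos (n+1) = pos :: pvKeysIn f (pos+1) n := by simp [pvKeysIn, hf]
      rw [hkeys]
      simp only [pvColsR, hf]
      rw [ih]
      have h2 : (pos + 1) + (n : Int) = pos + ((n+1 : Nat) : Int) := by push_cast; ring
      rw [h2]
      simp [pvToksR, hf]

theorem pvToksR_width (ff : Int → String × String) (w1 w2 : Int)
    (hw : ∀ p : Int, 0 ≤ p → (w1 - p).toNat = (w2 - p).toNat) :
    ∀ (L : List Int) (pos : Int) (a : Option String), (∀ i ∈ L, 0 ≤ i) → 0 ≤ pos →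
      pvToksR ff w1 L pos a = pvToksR ff w2 L pos a := by
  intro L
  induction L with
  | nil =>
    intro pos a h0 hp
    simp [pvToksR, hw pos hp]
  | cons i rest ih =>
    intro pos a h0 hp
    have hi : (0:Int) ≤ i := h0 i List.mem_cons_self
    simp only [pvToksR]
    rw [ih (i+1) (some (ff i).1) (fun j hj => h0 j (List.mem_cons_of_mem _ hj)) (by omega)]

theorem pvColsR_congr (f g : Int → Option (String × String)) :
    ∀ (n : Nat) (pos : Int) (a : Option String),
      (∀ i, pos ≤ i → i < pos + n → f i = g i) →
      pvColsR f n pos a = pvColsR g n pos a := by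
  intro n
  induction n with
  | zero => intro pos a _; rfl
  | succ n ih =>
    intro pos a h
    have hp : f pos = g pos := h pos (le_refl _) (by push_cast; omega)
    have hrec : ∀ (b : Option String), pvColsR f n (pos+1) b = pvColsR g n (pos+1) b :=
      fun b => ih (pos+1) b (fun i h1 h2 => h i (by omega) (by push_cast at *; omega))
    cases hg : g pos with
    | none => simp only [pvColsR, hp, hg, hrec]
    | some cg => simp only [pvColsR, hp, hg, hrec]

-- the two dicts agree on the in-range keys
theorem pvDicts (width : Int) :
    ∀ (ts : List (Int × String × String)) (dA dB : PySem.Dict Int (String × String)),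
      (∀ i, 0 ≤ i → i < width → dB.get? i = dA.get? i) →
      ∀ i, 0 ≤ i → i < width →
        (ts.foldl (fun d t => if 0 ≤ t.1 ∧ t.1 < width then d.insert t.1 (t.2.1, t.2.2) else d) dB).get? i
          = (ts.foldl (fun d t => d.insert t.1 (t.2.1, t.2.2)) dA).get? i := by
  intro ts
  induction ts with
  | nil => intro dA dB h; exact h
  | cons t ts ih =>
    intro dA dB h
    simp only [List.foldl_cons]
    apply ih
    intro i h0 hiw
    by_cases he : i = t.1
    · subst he
      have hr : 0 ≤ t.1 ∧ t.1 < width := ⟨h0, hiw⟩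
      simp [hr]
    · by_cases hr : 0 ≤ t.1 ∧ t.1 < width <;>
        simp [hr, PySem.Dict.get?_insert, he, h i h0 hiw]

theorem pvB_keys_bound (width : Int) :
    ∀ (ts : List (Int × String × String)) (d : PySem.Dict Int (String × String)),
      (∀ i ∈ d.keys, 0 ≤ i ∧ i < width) →
      ∀ i ∈ (ts.foldl (fun d t => if 0 ≤ t.1 ∧ t.1 < width then d.insert t.1 (t.2.1, t.2.2) else d) d).keys,
        0 ≤ i ∧ i < width := by
  intro ts
  induction ts with
  | nil => intro d h; exact h
  | cons t ts ih =>
    intro d h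
    simp only [List.foldl_cons]
    apply ih
    intro i hi
    by_cases hr : 0 ≤ t.1 ∧ t.1 < width
    · rw [if_pos hr] at hi
      rcases (PySem.Dict.mem_keys_insert _ _ _ _).mp hi with rfl | hm
      · exact hr
      · exact h i hm
    · rw [if_neg hr] at hi
      exact h i hi

theorem pvB_keys_nodup (width : Int) :
    ∀ (ts : List (Int × String × String)) (d : PySem.Dict Int (String × String)),
      d.keys.Nodup →
      (ts.foldl (fun d t => if 0 ≤ t.1 ∧ t.1 < width then d.insert t.1 (t.2.1, t.2.2) else d) d).keys.Nodup := by
  intro ts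
  induction ts with
  | nil => intro d h; exact h
  | cons t ts ih =>
    intro d h
    simp only [List.foldl_cons]
    apply ih
    by_cases hr : 0 ≤ t.1 ∧ t.1 < width
    · rw [if_pos hr]; exact PySem.Dict.nodup_keys_insert _ _ _ h
    · rw [if_neg hr]; exact h

theorem pvSortedKeys (width : Int) (dB : PySem.Dict Int (String × String))
    (hn : dB.keys.Nodup) (hb : ∀ i ∈ dB.keys, 0 ≤ i ∧ i < width) :
    PySem.List.sorted dB.keys (fun x => x) = pvKeysIn dB.get? 0 width.toNat := by
  have hpair : (pvKeysIn dB.get? 0 width.toNat).Pairwise (· < ·) := pvKeysIn_pairwise _ _ _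
  have hnd : (pvKeysIn dB.get? 0 width.toNat).Nodup := hpair.imp (fun h => ne_of_lt h)
  have hperm : (pvKeysIn dB.get? 0 width.toNat).Perm dB.keys := by
    rw [List.perm_ext_iff_of_nodup hnd hn]
    intro x
    rw [pvKeysIn_mem]
    constructor
    · rintro ⟨h1, h2, h3⟩
      have : dB.get? x ≠ none := by
        intro h; rw [h] at h3; simp at h3
      by_contra hx
      exact this ((PySem.Dict.get?_eq_none_iff_not_mem_keys _ _).mpr hx)
    · intro hx
      have hbx := hb x hx
      have : dB.get? x ≠ none := by
        intro h
        exact absurd hx ((PySem.Dict.get?_eq_none_iff_not_mem_keys _ _).mp h)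
      refine ⟨hbx.1, by omega, ?_⟩
      cases hg : dB.get? x with
      | none => exact absurd hg this
      | some v => rfl
  exact PySem.List.sorted_eq_of_perm_of_pairwise_lt _ _ _ hperm hpair

-- ===== VERDICT (by name: the statement is the Claim_ definition above) =====
theorem render_drip_line_py_spec : Claim_equal_render_drip_line_py := by
  intro width tokens _
  unfold Spec_render_drip_line_py
  apply String.toList_inj.mp
  simp only [render_drip_line_py, render_drip_line_py_alt]
  rw [pvFinA_eq, pvFinB_eq]
  rw [PySem.List.pyRange_one]
  simp only [Int.sub_zero]
  rw [pvA_loop, pvB_loop]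
  set dA := tokens.foldl (fun d t => d.insert t.1 (t.2.1, t.2.2)) PySem.Dict.empty with hdA
  set dB := tokens.foldl (fun d t => if 0 ≤ t.1 ∧ t.1 < width then d.insert t.1 (t.2.1, t.2.2) else d) PySem.Dict.empty with hdB
  have hd : ∀ i, 0 ≤ i → i < width → dB.get? i = dA.get? i :=
    pvDicts width tokens PySem.Dict.empty PySem.Dict.empty (fun i _ _ => rfl)
  have hb : ∀ i ∈ dB.keys, 0 ≤ i ∧ i < width := by
    apply pvB_keys_bound width tokens PySem.Dict.empty
    simp [PySem.Dict.keys_empty]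
  have hn : dB.keys.Nodup := by
    apply pvB_keys_nodup width tokens PySem.Dict.empty
    simp [PySem.Dict.keys_empty]
  rw [pvColsR_congr dA.get? dB.get? width.toNat 0 none
    (fun i h1 h2 => (hd i h1 (by omega)).symm)]
  rw [pvCore]
  rw [show (fun i => PySem.Dict.getD dB i ("", "")) = (fun i => (dB.get? i).getD ("", "")) from
    funext fun i => PySem.Dict.getD_eq_get?_getD _ _ _]
  rw [pvSortedKeys width dB hn hb]
  apply congrArg
  exact pvToksR_width _ _ _ (fun p hp => by omega) _ 0 none
    (fun i hi => ((pvKeysIn_mem _ _ _ _).mp hi).1) (le_refl 0)
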